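-- pv_equiv track=rewrite | github.com/demiral01kadir-lgtm/phyton-codes-for-VRP- | run_experiment.py | split_into_subsets
-- ===== SOURCE A (Python) =====
-- def split_into_subsets(items, n_subsets=10):
--
--
--
--     N = len(items)
--     base = N // n_subsets
--     extra = N % n_subsets
--
--     subsets = []
--     start = 0
--     for i in range(n_subsets):
--         size = base + (1 if i < extra else 0)
--         subsets.append(items[start:start + size])
--         start += size
--     return subsets
-- ===== SOURCE B (Python) =====
-- def split_into_subsets(items, n_subsets=10):
--     N = len(items)
--     base = N // n_subsets
--     extra = N % n_subsets
--     # closed-form boundary table: bounds[i] = total size of the first i chunks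
--     bounds = [i * base + min(i, extra) for i in range(n_subsets + 1)]
--     return [items[bounds[i]:bounds[i + 1]] for i in range(n_subsets)]
-- ===== Notes on version B (the rewrite author's own statement) =====
-- stated objective: alternative
-- what changed: Replaces the running-start accumulator loop with a precomputed closed-form boundary table bounds[i] = i*base + min(i, extra) and a slice comprehension over adjacent boundary pairs.
import Mathlib
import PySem

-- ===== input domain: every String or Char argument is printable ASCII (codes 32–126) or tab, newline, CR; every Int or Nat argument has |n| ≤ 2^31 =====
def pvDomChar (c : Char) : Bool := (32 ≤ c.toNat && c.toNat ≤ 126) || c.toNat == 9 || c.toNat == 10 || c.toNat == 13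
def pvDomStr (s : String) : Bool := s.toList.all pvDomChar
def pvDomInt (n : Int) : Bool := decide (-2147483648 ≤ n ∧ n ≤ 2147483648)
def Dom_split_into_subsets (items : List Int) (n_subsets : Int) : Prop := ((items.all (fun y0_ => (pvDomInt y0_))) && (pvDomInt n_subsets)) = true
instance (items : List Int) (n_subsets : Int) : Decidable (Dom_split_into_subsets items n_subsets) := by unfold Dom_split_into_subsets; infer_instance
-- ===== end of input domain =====

-- B replaces A's running-start accumulator loop with a closed-form boundary table
-- bounds[i] = i*base + min(i, extra) and slices adjacent boundary pairs (alternative decomposition).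


-- ===== PORT A =====
def split_into_subsets (items : List Int) (n_subsets : Int) : List (List Int) :=
  let N : Int := items.length
  let base := PySem.Int.floordiv N n_subsets
  let extra := PySem.Int.mod N n_subsets
  let st := (PySem.List.pyRange 0 n_subsets 1).foldl
    (fun (st : List (List Int) × Int) i =>
      let size := base + (if i < extra then (1 : Int) else 0)
      (st.1 ++ [PySem.List.slice items (some st.2) (some (st.2 + size))], st.2 + size))
    ([], 0)
  st.1

-- ===== PORT B =====
def split_into_subsets_alt (items : List Int) (n_subsets : Int) : List (List Int) :=
  let N : Int := items.length
  let base := PySem.Int.floordiv N n_subsets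
  let extra := PySem.Int.mod N n_subsets
  let bounds := (PySem.List.pyRange 0 (n_subsets + 1) 1).map (fun i => i * base + min i extra)
  -- indexing bounds[i] is always in range (0 ≤ i ≤ n_subsets < len bounds), so pyGetD with default 0 is exact
  (PySem.List.pyRange 0 n_subsets 1).map
    (fun i => PySem.List.slice items (some (PySem.List.pyGetD bounds i 0))
                                     (some (PySem.List.pyGetD bounds (i + 1) 0)))

-- ===== PRECONDITION & SPEC =====
-- Pre_ excludes exactly n_subsets = 0, where Python A raises ZeroDivisionError (N // 0).
def Pre_split_into_subsets (items : List Int) (n_subsets : Int) : Prop := n_subsets ≠ 0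
instance (items : List Int) (n_subsets : Int) : Decidable (Pre_split_into_subsets items n_subsets) := by unfold Pre_split_into_subsets; infer_instance
def pvWitness_split_into_subsets : List Int × Int := ([1, 2, 3, 4, 5], 3)

def Spec_split_into_subsets (items : List Int) (n_subsets : Int) (out : List (List Int)) : Prop := out = split_into_subsets_alt items n_subsets
instance (items : List Int) (n_subsets : Int) (out : List (List Int)) : Decidable (Spec_split_into_subsets items n_subsets out) := by unfold Spec_split_into_subsets; infer_instance

-- ===== CLAIM (what is proved, stated in full; the proofs are below) =====
def Claim_equal_split_into_subsets : Prop := ∀ (items : List Int) (n_subsets : Int), Dom_split_into_subsets items n_subsets → Pre_split_into_subsets items n_subsets → Spec_split_into_subsets items n_subsets (split_into_subsets items n_subsets)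

-- ===== LEMMAS AND PROOFS =====

-- the chunk-boundary function: bnd i = i*base + min i extra
def pvBnd (base extra i : Int) : Int := i * base + min i extra

lemma pvBnd_step (base extra i : Int) :
    pvBnd base extra (i + 1) = pvBnd base extra i + (base + (if i < extra then (1 : Int) else 0)) := by
  unfold pvBnd
  have hmul : (i + 1) * base = i * base + base := by ring
  rw [hmul]
  split_ifs with h <;> omega

-- A's loop, abstracted: slice list produced from an index list with running start
def pvRunA (items : List Int) (base extra : Int) : List Int → Int → List (List Int)
  | [], _ => []
  | i :: rest, start =>
      let size := base + (if i < extra then (1 : Int) else 0)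
      PySem.List.slice items (some start) (some (start + size)) ::
        pvRunA items base extra rest (start + size)

lemma foldA_eq_runA (items : List Int) (base extra : Int) :
    ∀ (l : List Int) (acc : List (List Int)) (start : Int),
      (l.foldl
        (fun (st : List (List Int) × Int) i =>
          let size := base + (if i < extra then (1 : Int) else 0)
          (st.1 ++ [PySem.List.slice items (some st.2) (some (st.2 + size))], st.2 + size))
        (acc, start)).1
      = acc ++ pvRunA items base extra l start := by
  intro l
  induction l with
  | nil => intro acc start; simp [pvRunA]
  | cons i rest ih =>
      intro acc start
      simp only [List.foldl_cons, pvRunA, ih]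
      simp

lemma runA_range (items : List Int) (base extra : Int) :
    ∀ (m : Nat) (n i : Int), 0 ≤ i → n ≤ i + m →
      pvRunA items base extra (PySem.List.pyRange i n 1) (pvBnd base extra i)
      = (PySem.List.pyRange i n 1).map (fun t =>
          PySem.List.slice items (some (pvBnd base extra t))
                                 (some (pvBnd base extra (t + 1)))) := by
  intro m
  induction m with
  | zero =>
      intro n i hi hle
      rw [PySem.List.pyRange_one_eq_nil (by omega)]
      simp [pvRunA]
  | succ m ih =>
      intro n i hi hle
      by_cases hlt : i < n
      · rw [PySem.List.pyRange_one_cons hlt]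
        simp only [pvRunA, List.map_cons]
        rw [← pvBnd_step base extra i, ih n (i + 1) (by omega) (by omega)]
      · rw [PySem.List.pyRange_one_eq_nil (by omega)]
        simp [pvRunA]

lemma bounds_getD (base extra : Int) (n i : Int) (h0 : 0 ≤ i) (h1 : i < n + 1) :
    PySem.List.pyGetD ((PySem.List.pyRange 0 (n + 1) 1).map (fun t => t * base + min t extra)) i 0
      = pvBnd base extra i := by
  rw [PySem.List.pyGetD_map_pyRange_of_nonneg _ _ _ _ h0 h1]
  rfl

theorem split_eq (items : List Int) (n : Int) (_hn : n ≠ 0) :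
    split_into_subsets items n = split_into_subsets_alt items n := by
  simp only [split_into_subsets, split_into_subsets_alt]
  by_cases hpos : 0 < n
  · have he : 0 ≤ PySem.Int.mod (items.length : Int) n := PySem.Int.mod_nonneg _ hpos
    set base := PySem.Int.floordiv (items.length : Int) n with hb
    set extra := PySem.Int.mod (items.length : Int) n with hx
    rw [foldA_eq_runA, List.nil_append]
    have hrun := runA_range items base extra n.toNat n 0 le_rfl (by omega)
    have hb0 : pvBnd base extra 0 = 0 := by
      simp [pvBnd]; omega
    rw [hb0] at hrun
    rw [hrun]
    apply List.map_congr_left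
    intro t ht
    rw [PySem.List.mem_pyRange_one] at ht
    rw [bounds_getD base extra n t (by omega) (by omega),
        bounds_getD base extra n (t + 1) (by omega) (by omega)]
  · rw [PySem.List.pyRange_one_eq_nil (by omega)]
    simp

-- ===== VERDICT (by name: the statement is the Claim_ definition above) =====
theorem split_into_subsets_spec : Claim_equal_split_into_subsets := by
  intro items n _ hn
  unfold Spec_split_into_subsets
  exact split_eq items n hn
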